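-- pv_equiv track=rewrite | github.com/11DingKing/label-00237-20260409 | backend/src/recognizer/char_recognizer.py | _is_similar_char
-- ===== SOURCE A (Python) =====
-- def _is_similar_char(char1: str, char2: str) -> bool:
--     """检查两个字符是否是常见的混淆字符"""
--     similar_pairs = [
--         ('0', 'O', 'Q', 'D'),
--         ('1', 'I', 'L'),
--         ('2', 'Z'),
--         ('5', 'S'),
--         ('6', 'G'),
--         ('8', 'B'),
--     ]
--     for group in similar_pairs:
--         if char1 in group and char2 in group:
--             return True
--     return False
-- ===== SOURCE B (Python) =====
-- _SIMILAR_GROUPS = [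
--     ('0', 'O', 'Q', 'D'),
--     ('1', 'I', 'L'),
--     ('2', 'Z'),
--     ('5', 'S'),
--     ('6', 'G'),
--     ('8', 'B'),
-- ]
-- _GROUP_OF = {ch: i for i, g in enumerate(_SIMILAR_GROUPS) for ch in g}
--
--
-- def _is_similar_char(char1: str, char2: str) -> bool:
--     g1 = _GROUP_OF.get(char1)
--     return g1 is not None and _GROUP_OF.get(char2) == g1
-- ===== Notes on version B (the rewrite author's own statement) =====
-- stated objective: idiomatic
-- what changed: Replaced the per-call scan over the list of confusable groups by a module-level char-to-group-index dict built once, so each call is two O(1) lookups and an equality test.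
import Mathlib
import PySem

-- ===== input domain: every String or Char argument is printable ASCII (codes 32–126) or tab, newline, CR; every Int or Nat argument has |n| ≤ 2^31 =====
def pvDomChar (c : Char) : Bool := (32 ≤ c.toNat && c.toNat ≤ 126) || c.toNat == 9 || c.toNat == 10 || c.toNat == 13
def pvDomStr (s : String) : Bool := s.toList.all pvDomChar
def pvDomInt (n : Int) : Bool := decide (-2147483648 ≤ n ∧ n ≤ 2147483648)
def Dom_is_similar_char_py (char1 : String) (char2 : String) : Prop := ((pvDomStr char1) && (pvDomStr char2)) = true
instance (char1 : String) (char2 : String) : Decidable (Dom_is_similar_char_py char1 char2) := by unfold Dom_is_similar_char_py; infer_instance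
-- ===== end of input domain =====

-- B replaces A's per-call scan over the groups by a precomputed char→group-index map queried twice (idiomatic; return value proved equal on all inputs).

-- ===== PORT A =====
-- the literal similar_pairs list of A
def pvSimilarGroups : List (List String) :=
  [["0", "O", "Q", "D"], ["1", "I", "L"], ["2", "Z"], ["5", "S"], ["6", "G"], ["8", "B"]]

-- the 'for group in similar_pairs: if char1 in group and char2 in group: return True' loop
def pvLoopA (char1 char2 : String) : List (List String) → Bool
  | [] => false
  | g :: rest => if g.contains char1 && g.contains char2 then true else pvLoopA char1 char2 rest

def is_similar_char_py (char1 : String) (char2 : String) : Bool :=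
  pvLoopA char1 char2 pvSimilarGroups

-- ===== PORT B =====
-- the module-level dict comprehension {ch: i for i, g in enumerate(_SIMILAR_GROUPS) for ch in g}
def pvGroupOf : PySem.Dict String Int :=
  PySem.Dict.ofList
    [("0", 0), ("O", 0), ("Q", 0), ("D", 0),
     ("1", 1), ("I", 1), ("L", 1),
     ("2", 2), ("Z", 2),
     ("5", 3), ("S", 3),
     ("6", 4), ("G", 4),
     ("8", 5), ("B", 5)]

def is_similar_char_py_alt (char1 : String) (char2 : String) : Bool :=
  match pvGroupOf.get? char1 with
  | none => false                     -- g1 is None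
  | some g1 => pvGroupOf.get? char2 == some g1

-- ===== PRECONDITION & SPEC =====
def Spec_is_similar_char_py (char1 : String) (char2 : String) (out : Bool) : Prop := out = is_similar_char_py_alt char1 char2
instance (char1 : String) (char2 : String) (out : Bool) : Decidable (Spec_is_similar_char_py char1 char2 out) := by unfold Spec_is_similar_char_py; infer_instance

-- ===== CLAIM (what is proved, stated in full; the proofs are below) =====
def Claim_equal_is_similar_char_py : Prop := ∀ (char1 : String) (char2 : String), Dom_is_similar_char_py char1 char2 → Spec_is_similar_char_py char1 char2 (is_similar_char_py char1 char2)

-- ===== LEMMAS AND PROOFS =====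

-- all characters occurring in any group
def pvAllChars : List String :=
  ["0", "O", "Q", "D", "1", "I", "L", "2", "Z", "5", "S", "6", "G", "8", "B"]

lemma pvGroupOf_eq : pvGroupOf = PySem.Dict.mk
    [("0", 0), ("O", 0), ("Q", 0), ("D", 0),
     ("1", 1), ("I", 1), ("L", 1),
     ("2", 2), ("Z", 2),
     ("5", 3), ("S", 3),
     ("6", 4), ("G", 4),
     ("8", 5), ("B", 5)] := by decide

lemma pv_key (c1 c2 : String) : is_similar_char_py c1 c2 = is_similar_char_py_alt c1 c2 := by
  by_cases h1 : c1 ∈ pvAllChars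
  · by_cases h2 : c2 ∈ pvAllChars
    · simp only [pvAllChars, List.mem_cons, List.not_mem_nil, or_false] at h1 h2
      rcases h1 with rfl|rfl|rfl|rfl|rfl|rfl|rfl|rfl|rfl|rfl|rfl|rfl|rfl|rfl|rfl <;>
        (rcases h2 with rfl|rfl|rfl|rfl|rfl|rfl|rfl|rfl|rfl|rfl|rfl|rfl|rfl|rfl|rfl <;> decide)
    · simp only [pvAllChars, List.mem_cons, List.not_mem_nil, or_false, not_or] at h2
      obtain ⟨n1, n2, n3, n4, n5, n6, n7, n8, n9, n10, n11, n12, n13, n14, n15⟩ := h2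
      have hc2 : pvGroupOf.get? c2 = none := by
        simp [pvGroupOf_eq, PySem.Dict.get?_mk_cons, PySem.Dict.get?, Ne.symm n1, Ne.symm n2,
          Ne.symm n3, Ne.symm n4, Ne.symm n5, Ne.symm n6, Ne.symm n7, Ne.symm n8, Ne.symm n9,
          Ne.symm n10, Ne.symm n11, Ne.symm n12, Ne.symm n13, Ne.symm n14, Ne.symm n15]
      have hA : is_similar_char_py c1 c2 = false := by
        simp [is_similar_char_py, pvLoopA, pvSimilarGroups, n1, n2, n3, n4, n5, n6, n7, n8,
          n9, n10, n11, n12, n13, n14, n15]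
      rw [hA, is_similar_char_py_alt, hc2]
      cases pvGroupOf.get? c1 <;> simp
  · simp only [pvAllChars, List.mem_cons, List.not_mem_nil, or_false, not_or] at h1
    obtain ⟨n1, n2, n3, n4, n5, n6, n7, n8, n9, n10, n11, n12, n13, n14, n15⟩ := h1
    have hc1 : pvGroupOf.get? c1 = none := by
      simp [pvGroupOf_eq, PySem.Dict.get?_mk_cons, PySem.Dict.get?, Ne.symm n1, Ne.symm n2,
        Ne.symm n3, Ne.symm n4, Ne.symm n5, Ne.symm n6, Ne.symm n7, Ne.symm n8, Ne.symm n9,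
        Ne.symm n10, Ne.symm n11, Ne.symm n12, Ne.symm n13, Ne.symm n14, Ne.symm n15]
    have hA : is_similar_char_py c1 c2 = false := by
      simp [is_similar_char_py, pvLoopA, pvSimilarGroups, n1, n2, n3, n4, n5, n6, n7, n8,
        n9, n10, n11, n12, n13, n14, n15]
    rw [hA, is_similar_char_py_alt, hc1]

-- ===== VERDICT (by name: the statement is the Claim_ definition above) =====
theorem is_similar_char_py_spec : Claim_equal_is_similar_char_py := by
  intro c1 c2 _
  unfold Spec_is_similar_char_py
  exact pv_key c1 c2
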